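-- pv_equiv track=rewrite | github.com/suppachailao/Antipsoriatic_Heliotherapy | block.py | genColBlock
-- ===== SOURCE A (Python) =====
-- def genColBlock(h1 = 9, h2 = 17, min1 = '00-', min2 = '30-'):
--
-- 	#input: start-hour, end-hour, min1, min2
-- 	#output: list
--
-- 	col_label = []
--
-- 	for h in range(h1, h2):
-- 		if h < 10:
-- 			col_label.extend(['0'+str(h)]* 2)
-- 		else:
-- 			col_label.extend([str(h) ]*2)
--
-- 	diff = h2 - h1
--
-- 	for indx in range(0, diff*2, 2): #min1
-- 		col_label[indx] += min1
--
-- 	for indx in range(1, diff*2 +1, 2): #min2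
-- 		col_label[indx] += min2
--
-- 	for i in range(0, len(col_label)-1): #copy and parse
-- 		col_label[i] += col_label[i+1][:-1]
--
-- 	col_label[-1] += str(h2) + '00' #last
--
-- 	return col_label
-- ===== SOURCE B (Python) =====
-- def genColBlock(h1 = 9, h2 = 17, min1 = '00-', min2 = '30-'):
--     # Build each final label directly, pairing every hour label with its successor;
--     # no intermediate token list and no index-mutation passes.
--     hs = [('0' + str(h)) if h < 10 else str(h) for h in range(h1, h2)]
--     out = []
--     for p, q in zip(hs, hs[1:]):
--         out.append(p + min1 + (p + min2)[:-1])
--         out.append(p + min2 + (q + min1)[:-1])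
--     p = hs[-1]
--     out.append(p + min1 + (p + min2)[:-1])
--     out.append(p + min2 + str(h2) + '00')
--     return out
-- ===== Notes on version B (the rewrite author's own statement) =====
-- stated objective: simpler
-- what changed: A builds a doubled hour-token list and runs three separate index-mutation passes (append min1 at even indices, min2 at odd indices, then merge each slot with its truncated successor) plus a final last-element patch; B builds each final label directly in one pass over consecutive hour pairs, with no intermediate token list and no index mutation.
import Mathlib
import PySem

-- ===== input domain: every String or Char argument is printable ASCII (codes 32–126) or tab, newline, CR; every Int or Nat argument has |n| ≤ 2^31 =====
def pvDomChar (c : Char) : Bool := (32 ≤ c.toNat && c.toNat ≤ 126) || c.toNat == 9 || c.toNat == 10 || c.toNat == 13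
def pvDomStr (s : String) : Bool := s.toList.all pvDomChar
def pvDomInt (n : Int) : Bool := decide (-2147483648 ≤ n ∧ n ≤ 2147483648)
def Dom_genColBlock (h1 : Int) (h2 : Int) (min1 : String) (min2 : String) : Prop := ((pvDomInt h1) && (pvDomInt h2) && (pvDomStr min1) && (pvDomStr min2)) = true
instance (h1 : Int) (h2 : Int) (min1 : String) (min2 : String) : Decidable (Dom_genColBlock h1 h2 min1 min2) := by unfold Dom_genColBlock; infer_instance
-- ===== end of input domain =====

-- B builds each hour-block label directly from consecutive hour pairs instead of A's
-- doubled token list plus three index-mutation passes; same return value on h1 < h2 (simpler).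


-- ===== PORT A =====
-- 'xs[i] += s' (read then write back at the same index); exact where Python's index is in
-- range — every index A uses is in range on the inputs Pre_genColBlock admits.
def setApp (xs : List String) (i : Int) (s : String) : List String :=
  PySem.List.pySetD xs i (PySem.List.pyGetD xs i "" ++ s)

def genColBlock (h1 : Int) (h2 : Int) (min1 : String) (min2 : String) : List String :=
  -- for h in range(h1, h2): extend with two copies of the (possibly 0-padded) hour label
  let col0 := (PySem.List.pyRange h1 h2 1).foldl
    (fun acc h =>
      if h < 10 then acc ++ ["0" ++ PySem.Int.toStr h, "0" ++ PySem.Int.toStr h]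
      else acc ++ [PySem.Int.toStr h, PySem.Int.toStr h]) []
  let diff := h2 - h1
  -- for indx in range(0, diff*2, 2): col_label[indx] += min1
  let col1 := (PySem.List.pyRange 0 (diff * 2) 2).foldl (fun acc indx => setApp acc indx min1) col0
  -- for indx in range(1, diff*2+1, 2): col_label[indx] += min2
  let col2 := (PySem.List.pyRange 1 (diff * 2 + 1) 2).foldl (fun acc indx => setApp acc indx min2) col1
  -- for i in range(0, len(col_label)-1): col_label[i] += col_label[i+1][:-1]
  let col3 := (PySem.List.pyRange 0 ((col2.length : Int) - 1) 1).foldl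
    (fun acc i => setApp acc i (PySem.Str.slice (PySem.List.pyGetD acc (i + 1) "") none (some (-1)))) col2
  -- col_label[-1] += str(h2) + '00'
  setApp col3 (-1) (PySem.Int.toStr h2 ++ "00")

-- ===== PORT B =====
-- hour label of the comprehension: '0'+str(h) if h < 10 else str(h)
def pad (h : Int) : String := if h < 10 then "0" ++ PySem.Int.toStr h else PySem.Int.toStr h

def genColBlock_alt (h1 : Int) (h2 : Int) (min1 : String) (min2 : String) : List String :=
  let hs := (PySem.List.pyRange h1 h2 1).map pad
  -- for p, q in zip(hs, hs[1:]): two appends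
  let out := (hs.zip (PySem.List.slice hs (some 1) none)).foldl
    (fun out pq =>
      (out ++ [(pq.1 ++ min1) ++ PySem.Str.slice (pq.1 ++ min2) none (some (-1))])
        ++ [(pq.1 ++ min2) ++ PySem.Str.slice (pq.2 ++ min1) none (some (-1))]) []
  -- p = hs[-1] (raises IndexError on an empty range, like A; excluded by Pre_), two final appends
  let p := PySem.List.pyGetD hs (-1) ""
  (out ++ [(p ++ min1) ++ PySem.Str.slice (p ++ min2) none (some (-1))])
    ++ [((p ++ min2) ++ PySem.Int.toStr h2) ++ "00"]

-- ===== PRECONDITION & SPEC =====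
-- Pre_ excludes exactly h1 >= h2, where the hour range is empty and both A and B raise IndexError.
def Pre_genColBlock (h1 : Int) (h2 : Int) (min1 : String) (min2 : String) : Prop := h1 < h2
instance (h1 : Int) (h2 : Int) (min1 : String) (min2 : String) : Decidable (Pre_genColBlock h1 h2 min1 min2) := by unfold Pre_genColBlock; infer_instance
def pvWitness_genColBlock : Int × Int × String × String := (9, 11, "00-", "30-")

def Spec_genColBlock (h1 : Int) (h2 : Int) (min1 : String) (min2 : String) (out : List String) : Prop := out = genColBlock_alt h1 h2 min1 min2
instance (h1 : Int) (h2 : Int) (min1 : String) (min2 : String) (out : List String) : Decidable (Spec_genColBlock h1 h2 min1 min2 out) := by unfold Spec_genColBlock; infer_instance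

-- ===== CLAIM (what is proved, stated in full; the proofs are below) =====
def Claim_equal_genColBlock : Prop := ∀ (h1 : Int) (h2 : Int) (min1 : String) (min2 : String), Dom_genColBlock h1 h2 min1 min2 → Pre_genColBlock h1 h2 min1 min2 → Spec_genColBlock h1 h2 min1 min2 (genColBlock h1 h2 min1 min2)

-- ===== LEMMAS AND PROOFS =====

theorem pyGetD_cons_shift (x : String) (xs : List String) (i : Int) (d : String) (hi : 1 ≤ i) :
    PySem.List.pyGetD (x :: xs) i d = PySem.List.pyGetD xs (i - 1) d := by
  simp only [PySem.List.pyGetD, PySem.List.pyGet?, PySem.List.pyIdx?]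
  have h0 : (0:Int) ≤ i := by omega
  have h1 : (0:Int) ≤ i - 1 := by omega
  simp only [h0, h1, if_pos]
  by_cases h' : i - 1 < (xs.length : Int)
  · have h : i < ((x :: xs).length : Int) := by simp; omega
    simp only [h, h', if_pos]
    have ht : i.toNat = (i-1).toNat + 1 := by omega
    rw [ht]
    simp
  · have h : ¬ i < ((x :: xs).length : Int) := by simp; omega
    simp only [h, h', if_false]
    simp

theorem setApp_cons_shift (x : String) (xs : List String) (i : Int) (s : String) (hi : 1 ≤ i) :
    setApp (x :: xs) i s = x :: setApp xs (i - 1) s := by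
  simp only [setApp, pyGetD_cons_shift x xs i _ hi]
  simp only [PySem.List.pySetD, PySem.List.pySet?, PySem.List.pyIdx?]
  have h0 : (0:Int) ≤ i := by omega
  have h1 : (0:Int) ≤ i - 1 := by omega
  simp only [h0, h1, if_pos]
  by_cases h' : i - 1 < (xs.length : Int)
  · have h : i < ((x :: xs).length : Int) := by simp; omega
    simp only [h, h', if_pos, Option.map_some, Option.getD_some]
    have ht : i.toNat = (i-1).toNat + 1 := by omega
    rw [ht]
    simp
  · have h : ¬ i < ((x :: xs).length : Int) := by simp; omega
    simp only [h, h', if_false]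
    simp

theorem setApp_zero_cons (x : String) (xs : List String) (s : String) :
    setApp (x :: xs) 0 s = (x ++ s) :: xs := by
  simp [setApp, PySem.List.pySetD, PySem.List.pySet?, PySem.List.pyIdx?, PySem.List.pyGetD,
    PySem.List.pyGet?]

theorem setApp_neg_one_singleton (x s : String) :
    setApp [x] (-1) s = [x ++ s] := by
  simp [setApp, PySem.List.pySetD, PySem.List.pySet?, PySem.List.pyIdx?, PySem.List.pyGetD,
    PySem.List.pyGet?]

theorem setApp_neg_one_cons (x : String) (l : List String) (s : String) (hl : l ≠ []) :
    setApp (x :: l) (-1) s = x :: setApp l (-1) s := by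
  have hlen : 0 < l.length := List.length_pos_iff.mpr hl
  simp only [setApp, PySem.List.pySetD, PySem.List.pySet?, PySem.List.pyIdx?, PySem.List.pyGetD,
    PySem.List.pyGet?]
  have c1 : ¬ ((0:Int) ≤ -1) := by omega
  have c2 : -(((x :: l).length : Int)) ≤ -1 := by simp only [List.length_cons]; push_cast; omega
  have c3 : -((l.length : Int)) ≤ -1 := by omega
  simp only [c1, if_false, c2, c3, if_pos, Option.map_some, Option.getD_some, Option.bind_some]
  have he : (x :: l).length - (-(-1:Int)).toNat = l.length - (-(-1:Int)).toNat + 1 := by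
    simp only [List.length_cons]; omega
  rw [he]
  have h2 : l.length - (-(-1:Int)).toNat < l.length := by omega
  simp

-- push two fixed heads through a fold of even/odd index updates (all indices ≥ 2)
theorem foldl_setApp_shift2 (rng : List Nat) (idx : Nat → Int) (hidx : ∀ k, 2 ≤ idx k)
    (s : String) : ∀ (x y : String) (t : List String),
    rng.foldl (fun acc k => setApp acc (idx k) s) (x :: y :: t)
      = x :: y :: rng.foldl (fun acc k => setApp acc (idx k - 2) s) t := by
  induction rng with
  | nil => intro x y t; rfl
  | cons i is ih =>
    intro x y t
    simp only [List.foldl_cons]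
    rw [setApp_cons_shift _ _ _ _ (by have := hidx i; omega),
        setApp_cons_shift _ _ _ _ (by have := hidx i; omega)]
    have : idx i - 1 - 1 = idx i - 2 := by omega
    rw [this, ih]

theorem evenCore (min1 : String) (f g : Int → String) :
    ∀ (r : List Int),
    (List.range r.length).foldl (fun acc (k : Nat) => setApp acc (2 * (k : Int)) min1)
        (r.flatMap fun h => [f h, g h])
      = r.flatMap fun h => [f h ++ min1, g h] := by
  intro r
  induction r with
  | nil => rfl
  | cons a r ih =>
    simp only [List.flatMap_cons, List.length_cons, List.range_succ_eq_map, List.foldl_cons,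
      List.foldl_map, List.cons_append, List.nil_append]
    rw [show ((2 : Int) * ((0:Nat) : Int)) = 0 by norm_num, setApp_zero_cons]
    rw [foldl_setApp_shift2 (List.range r.length) _ (fun k => by push_cast; omega)]
    have hb : (fun (acc : List String) (k : Nat) => setApp acc (2 * ((k+1 : Nat) : Int) - 2) min1)
        = fun acc (k : Nat) => setApp acc (2 * (k : Int)) min1 := by
      funext acc k; congr 1; push_cast; ring
    rw [hb, ih]

theorem oddCore (min2 : String) (f g : Int → String) :
    ∀ (r : List Int),
    (List.range r.length).foldl (fun acc (k : Nat) => setApp acc (1 + 2 * (k : Int)) min2)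
        (r.flatMap fun h => [f h, g h])
      = r.flatMap fun h => [f h, g h ++ min2] := by
  intro r
  induction r with
  | nil => rfl
  | cons a r ih =>
    simp only [List.flatMap_cons, List.length_cons, List.range_succ_eq_map, List.foldl_cons,
      List.foldl_map, List.cons_append, List.nil_append]
    rw [show ((1 : Int) + 2 * ((0:Nat) : Int)) = 1 by norm_num]
    rw [setApp_cons_shift _ _ _ _ (by omega), show ((1:Int) - 1) = 0 by norm_num, setApp_zero_cons]
    rw [foldl_setApp_shift2 (List.range r.length) _ (fun k => by push_cast; omega)]
    have hb : (fun (acc : List String) (k : Nat) => setApp acc (1 + 2 * ((k+1 : Nat) : Int) - 2) min2)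
        = fun acc (k : Nat) => setApp acc (1 + 2 * (k : Int)) min2 := by
      funext acc k; congr 1; push_cast; ring
    rw [hb, ih]

def dropS (s : String) : String := PySem.Str.slice s none (some (-1))

-- body of A's copy loop: col_label[i] += col_label[i+1][:-1]
def cbody (acc : List String) (i : Int) : List String :=
  setApp acc i (dropS (PySem.List.pyGetD acc (i + 1) ""))

-- merge each element with its truncated successor (what the copy loop computes)
def mergeNext : List String → List String
  | [] => []
  | [x] => [x]
  | x :: y :: t => (x ++ dropS y) :: mergeNext (y :: t)

theorem foldl_cbody_shift1 (idxs : List Int) (hidx : ∀ i ∈ idxs, 1 ≤ i) :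
    ∀ (x : String) (t : List String),
    idxs.foldl cbody (x :: t) = x :: (idxs.map (· - 1)).foldl cbody t := by
  induction idxs with
  | nil => intro x t; rfl
  | cons i is ih =>
    intro x t
    have hi : 1 ≤ i := hidx i (by simp)
    simp only [List.foldl_cons, List.map_cons]
    have hstep : cbody (x :: t) i = x :: cbody t (i - 1) := by
      unfold cbody
      rw [pyGetD_cons_shift _ _ _ _ (by omega), setApp_cons_shift _ _ _ _ hi]
      have : i + 1 - 1 = (i - 1) + 1 := by omega
      rw [this]
    rw [hstep, ih (fun j hj => hidx j (by simp [hj]))]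

theorem copyPass : ∀ (L : List String),
    (PySem.List.pyRange 0 ((L.length : Int) - 1) 1).foldl cbody L = mergeNext L := by
  intro L
  induction L with
  | nil => rfl
  | cons x t ih =>
    match t with
    | [] => rfl
    | y :: t' =>
      have hlen : ((x :: y :: t').length : Int) - 1 = ((t'.length : Int) + 1) := by
        simp only [List.length_cons]; push_cast; omega
      rw [hlen, PySem.List.pyRange_one_cons (by omega), List.foldl_cons]
      have hstep : cbody (x :: y :: t') 0 = (x ++ dropS y) :: y :: t' := by
        unfold cbody
        rw [show ((0:Int) + 1) = 1 by norm_num,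
            pyGetD_cons_shift _ _ _ _ (by omega), show ((1:Int) - 1) = 0 by norm_num,
            PySem.List.pyGetD_zero_cons, setApp_zero_cons]
      rw [hstep, show ((0:Int) + 1) = 1 by norm_num]
      rw [foldl_cbody_shift1 _ (fun i hi => ((PySem.List.mem_pyRange_one).mp hi).1)]
      have hmap : (PySem.List.pyRange 1 ((t'.length : Int) + 1) 1).map (· - 1)
          = PySem.List.pyRange 0 ((t'.length : Int)) 1 := by
        rw [PySem.List.pyRange_one, PySem.List.pyRange_one]
        simp only [List.map_map]
        have : ((t'.length : Int) + 1 - 1) = ((t'.length : Int) - 0) := by omega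
        rw [this]
        apply List.map_congr_left
        intro k _
        simp
      rw [hmap]
      have hlen2 : ((t'.length : Int)) = (((y :: t').length : Int) - 1) := by simp
      rw [hlen2, ih]
      rfl

theorem bridgeEven (m : Nat) (body : List String → Int → List String) (init : List String) :
    (PySem.List.pyRange 0 ((m : Int) * 2) 2).foldl body init
      = (List.range m).foldl (fun acc (k : Nat) => body acc (2 * (k : Int))) init := by
  rw [PySem.List.pyRange_of_pos _ _ (by norm_num)]
  have hN : (if (0:Int) < (m : Int) * 2 then (((m : Int) * 2 - 0 + 2 - 1) / 2).toNat else 0) = m := by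
    split <;> omega
  rw [hN, List.foldl_map]
  apply PySem.List.foldl_congr_mem
  intro acc k _; congr 1; ring

theorem bridgeOdd (m : Nat) (body : List String → Int → List String) (init : List String) :
    (PySem.List.pyRange 1 ((m : Int) * 2 + 1) 2).foldl body init
      = (List.range m).foldl (fun acc (k : Nat) => body acc (1 + 2 * (k : Int))) init := by
  rw [PySem.List.pyRange_of_pos _ _ (by norm_num)]
  have hN : (if (1:Int) < (m : Int) * 2 + 1 then (((m : Int) * 2 + 1 - 1 + 2 - 1) / 2).toNat else 0) = m := by
    split <;> omega
  rw [hN, List.foldl_map]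

-- the labels B produces, expressed structurally on the hour list (proof-side helper)
def bCore (h2 : Int) (min1 min2 : String) : List Int → List String
  | [] => []
  | [h] => [(pad h ++ min1) ++ dropS (pad h ++ min2),
            ((pad h ++ min2) ++ PySem.Int.toStr h2) ++ "00"]
  | h :: h' :: t => ((pad h ++ min1) ++ dropS (pad h ++ min2))
      :: ((pad h ++ min2) ++ dropS (pad h' ++ min1))
      :: bCore h2 min1 min2 (h' :: t)

theorem mergeNext_ne_nil (L : List String) (hL : L ≠ []) : mergeNext L ≠ [] := by
  match L with
  | [x] => simp [mergeNext]
  | x :: y :: t => simp [mergeNext]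

theorem eqCore (h2 : Int) (min1 min2 : String) :
    ∀ (t : List Int) (h : Int),
    setApp (mergeNext ((h :: t).flatMap fun x => [pad x ++ min1, pad x ++ min2])) (-1)
        (PySem.Int.toStr h2 ++ "00")
      = bCore h2 min1 min2 (h :: t) := by
  intro t
  induction t with
  | nil =>
    intro h
    simp only [List.flatMap_cons, List.flatMap_nil, List.append_nil, mergeNext, bCore]
    rw [setApp_neg_one_cons _ _ _ (by simp), setApp_neg_one_singleton]
    simp [String.append_assoc]
  | cons h' t ih =>
    intro h
    simp only [List.flatMap_cons, List.cons_append, List.nil_append]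
    rw [show ∀ (a b c d : String) (l : List String),
          mergeNext (a :: b :: c :: d :: l) = (a ++ dropS b) :: mergeNext (b :: c :: d :: l)
        from fun a b c d l => rfl]
    rw [show ∀ (b c d : String) (l : List String),
          mergeNext (b :: c :: d :: l) = (b ++ dropS c) :: mergeNext (c :: d :: l)
        from fun b c d l => rfl]
    rw [setApp_neg_one_cons _ _ _ (List.cons_ne_nil _ _)]
    rw [setApp_neg_one_cons _ _ _ (mergeNext_ne_nil _ (List.cons_ne_nil _ _))]
    have ih' := ih h'
    simp only [List.flatMap_cons, List.cons_append, List.nil_append] at ih'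
    rw [ih']
    rfl

theorem zipFlat (h2 : Int) (min1 min2 : String) :
    ∀ (t : List Int) (h : Int),
    ((((h :: t).map pad).zip (((h :: t).map pad).tail)).flatMap
        (fun pq => [(pq.1 ++ min1) ++ dropS (pq.1 ++ min2), (pq.1 ++ min2) ++ dropS (pq.2 ++ min1)]))
      ++ [((((h :: t).map pad).getLast (by simp)) ++ min1) ++ dropS ((((h :: t).map pad).getLast (by simp)) ++ min2),
          (((((h :: t).map pad).getLast (by simp)) ++ min2) ++ PySem.Int.toStr h2) ++ "00"]
      = bCore h2 min1 min2 (h :: t) := by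
  intro t
  induction t with
  | nil => intro h; simp [bCore, dropS]
  | cons h' t ih =>
    intro h
    simp only [List.map_cons, List.tail_cons, List.zip_cons_cons, List.flatMap_cons,
      List.cons_append, List.nil_append]
    rw [List.getLast_cons (by simp)]
    have ih' := ih h'
    simp only [List.map_cons, List.tail_cons] at ih'
    rw [show bCore h2 min1 min2 (h :: h' :: t)
          = ((pad h ++ min1) ++ dropS (pad h ++ min2))
            :: ((pad h ++ min2) ++ dropS (pad h' ++ min1)) :: bCore h2 min1 min2 (h' :: t) from rfl]
    rw [← ih']

theorem altChar (h1 h2 : Int) (min1 min2 : String) (hne : PySem.List.pyRange h1 h2 1 ≠ []) :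
    genColBlock_alt h1 h2 min1 min2 = bCore h2 min1 min2 (PySem.List.pyRange h1 h2 1) := by
  obtain ⟨h, t, hr⟩ := List.exists_cons_of_ne_nil hne
  simp only [genColBlock_alt, hr]
  rw [PySem.List.slice_from_one]
  rw [PySem.List.foldl_congr_mem _ _
      (fun out pq => out ++ [(pq.1 ++ min1) ++ dropS (pq.1 ++ min2),
        (pq.1 ++ min2) ++ dropS (pq.2 ++ min1)]) _
      (fun acc x _ => by simp [dropS])]
  rw [PySem.List.foldl_append_eq_flatMap]
  simp only [show ∀ s : String, PySem.Str.slice s none (some (-1)) = dropS s from fun s => rfl]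
  have hp := PySem.List.pyGetD_neg_one (xs := (h :: t).map pad) (d := "") (by simp)
  rw [hp]
  rw [List.nil_append]
  simp only [List.append_assoc, List.singleton_append]
  exact zipFlat h2 min1 min2 t h

theorem main_spec (h1 h2 : Int) (min1 min2 : String) (hpre : h1 < h2) :
    genColBlock h1 h2 min1 min2 = genColBlock_alt h1 h2 min1 min2 := by
  have hm : h2 - h1 = ((PySem.List.pyRange h1 h2 1).length : Int) := by
    rw [PySem.List.length_pyRange_one]; omega
  have hne : PySem.List.pyRange h1 h2 1 ≠ [] := by
    intro hc
    have := PySem.List.length_pyRange_one h1 h2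
    rw [hc] at this
    simp at this; omega
  simp only [genColBlock]
  -- stage 1: build of the doubled token list
  rw [PySem.List.foldl_congr_mem (PySem.List.pyRange h1 h2 1)
      (fun acc h =>
        if h < 10 then acc ++ ["0" ++ PySem.Int.toStr h, "0" ++ PySem.Int.toStr h]
        else acc ++ [PySem.Int.toStr h, PySem.Int.toStr h])
      (fun acc h => acc ++ [pad h, pad h]) []
      (fun acc x _ => by by_cases hx : x < 10 <;> simp [pad, hx])]
  rw [PySem.List.foldl_append_eq_flatMap, List.nil_append]
  -- stage 2: min1 at even indices
  rw [hm, bridgeEven, evenCore]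
  -- stage 3: min2 at odd indices
  rw [bridgeOdd, oddCore]
  -- stage 4: merge with truncated successor
  rw [show (fun (acc : List String) (i : Int) =>
        setApp acc i (PySem.Str.slice (PySem.List.pyGetD acc (i + 1) "") none (some (-1)))) = cbody
      from rfl]
  rw [copyPass]
  -- stage 5: last element + equivalence with B
  obtain ⟨h, t, hr⟩ := List.exists_cons_of_ne_nil hne
  rw [hr, eqCore, altChar _ _ _ _ hne, hr]

-- ===== VERDICT (by name: the statement is the Claim_ definition above) =====
theorem genColBlock_spec : Claim_equal_genColBlock := by
  intro h1 h2 min1 min2 _ hpre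
  exact main_spec h1 h2 min1 min2 hpre
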